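-- pv_equiv track=rewrite | github.com/lejkosir/AoC | 2024/2.py | funct
-- ===== SOURCE A (Python) =====
-- def funct(num, asc):
--     for i, x in enumerate(num):
--         if i == 0:
--             add = 1
--             for y in zip(num, num[1:]):
--                 if asc > 0:
--                     if not 1 <= y[1] - y[0] <= 3:
--                         add = 0
--                 else:
--                     if not 1 <= y[0] - y[1] <= 3:
--                         add = 0
--             if add != 0:
--                 return add
--         add = 1
--         xd = num.copy()
--         xd.pop(i)
--         for y in zip(xd, xd[1:]):
--             if asc > 0:
--                 if not 1 <= y[1] - y[0] <= 3:
--                     add = 0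
--             else:
--                 if not 1 <= y[0] - y[1]<= 3:
--                     add = 0
--         if add:
--             return add
--     return 0
-- ===== SOURCE B (Python) =====
-- def funct(num, asc):
--     def ok(a, b):
--         d = b - a if asc > 0 else a - b
--         return 1 <= d <= 3
--     j = None
--     for k, (a, b) in enumerate(zip(num, num[1:])):
--         if not ok(a, b):
--             j = k
--             break
--     if j is None:
--         return 1
--     for k in (j, j + 1):
--         rem = num[:k] + num[k + 1:]
--         if all(ok(a, b) for a, b in zip(rem, rem[1:])):
--             return 1
--     return 0
-- ===== Notes on version B (the rewrite author's own statement) =====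
-- stated objective: faster
-- what changed: A tries deleting every index and rescans the whole list each time (plus a full-list scan); B makes one linear pass to find a violating adjacent pair and tests deleting only its two endpoints, since deleting any other index leaves that bad pair adjacent.
-- intended difference: On the empty list A returns 0 because its outer loop never runs, while B returns 1, the intended value: an empty sequence has no violating pair, consistent with A's own answer 1 for a one-element list. — e.g. on funct([], 1): A returns 0, B returns 1
import Mathlib
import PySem

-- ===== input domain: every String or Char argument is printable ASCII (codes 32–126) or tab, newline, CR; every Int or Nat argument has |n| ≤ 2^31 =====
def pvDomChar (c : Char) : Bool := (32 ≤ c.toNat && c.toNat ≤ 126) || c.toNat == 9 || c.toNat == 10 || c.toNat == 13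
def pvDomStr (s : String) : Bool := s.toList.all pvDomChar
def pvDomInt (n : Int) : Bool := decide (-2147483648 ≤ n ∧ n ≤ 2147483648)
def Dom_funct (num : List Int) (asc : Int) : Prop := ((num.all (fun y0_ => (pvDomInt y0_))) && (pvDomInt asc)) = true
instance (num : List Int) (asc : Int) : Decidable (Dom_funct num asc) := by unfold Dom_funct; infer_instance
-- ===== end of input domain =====

-- B replaces A's try-removing-every-index quadratic scan by one pass that finds a violating
-- adjacent pair and tests removing only its two endpoints (objective: faster).

-- ===== PORT A =====
-- functScan is the duplicated inner `for y in zip(num, num[1:]): … add = 0` block of A, used verbatim twice;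
-- `for i, x in enumerate(num)` is structural recursion carrying the index i;
-- `xd = num.copy(); xd.pop(i)` is `num.eraseIdx i` (i is a valid index from enumerate, so pop cannot raise).
def functScan (asc : Int) (l : List Int) : Int :=
  (l.zip (PySem.List.slice l (some 1) none)).foldl
    (fun add y =>
      if asc > 0 then
        if ¬ (1 ≤ y.2 - y.1 ∧ y.2 - y.1 ≤ 3) then 0 else add
      else
        if ¬ (1 ≤ y.1 - y.2 ∧ y.1 - y.2 ≤ 3) then 0 else add)
    1

def functLoop (num : List Int) (asc : Int) : Nat → List Int → Int
  | _, [] => 0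
  | i, _x :: rest =>
    if i = 0 then
      let add := functScan asc num
      if add ≠ 0 then add
      else
        let add := functScan asc (num.eraseIdx i)
        if add ≠ 0 then add else functLoop num asc (i + 1) rest
    else
      let add := functScan asc (num.eraseIdx i)
      if add ≠ 0 then add else functLoop num asc (i + 1) rest

def funct (num : List Int) (asc : Int) : Int := functLoop num asc 0 num

-- ===== PORT B =====
def okB (asc a b : Int) : Bool :=
  let d := if asc > 0 then b - a else a - b
  decide (1 ≤ d ∧ d ≤ 3)

def allOkB (asc : Int) (l : List Int) : Bool :=
  (l.zip (PySem.List.slice l (some 1) none)).all (fun p => okB asc p.1 p.2)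

def functRem (num : List Int) (k : Int) : List Int :=
  PySem.List.slice num none (some k) ++ PySem.List.slice num (some (k + 1)) none

def funct_alt (num : List Int) (asc : Int) : Int :=
  match (PySem.List.enumerate (num.zip (PySem.List.slice num (some 1) none))).find?
      (fun p => ! okB asc p.2.1 p.2.2) with
  | none => 1
  | some (j, _) =>
    if allOkB asc (functRem num j) then 1
    else if allOkB asc (functRem num (j + 1)) then 1
    else 0


-- ===== PRECONDITION & SPEC =====
-- On the empty list A returns 0 (its outer loop never runs) although an empty report has no
-- violating pair; B returns 1, the intended value (vacuously valid, as for a one-element list).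
def D_funct (num : List Int) (asc : Int) : Prop := num = []
instance (num : List Int) (asc : Int) : Decidable (D_funct num asc) := by unfold D_funct; infer_instance

def Spec_funct (num : List Int) (asc : Int) (out : Int) : Prop := ¬ D_funct num asc → out = funct_alt num asc
instance (num : List Int) (asc : Int) (out : Int) : Decidable (Spec_funct num asc out) := by unfold Spec_funct; infer_instance

def pvDiffWitness_funct : List Int × Int := ([], 1)
def pvDiffWitnessOut_funct : Int × Int := (0, 1)

-- ===== CLAIM (what is proved, stated in full; the proofs are below) =====
def Claim_unchanged_funct : Prop := ∀ (num : List Int) (asc : Int), Dom_funct num asc → Spec_funct num asc (funct num asc)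
def Claim_changed_funct : Prop := Dom_funct (pvDiffWitness_funct.1) (pvDiffWitness_funct.2) ∧ D_funct (pvDiffWitness_funct.1) (pvDiffWitness_funct.2) ∧ funct (pvDiffWitness_funct.1) (pvDiffWitness_funct.2) = pvDiffWitnessOut_funct.1 ∧ funct_alt (pvDiffWitness_funct.1) (pvDiffWitness_funct.2) = pvDiffWitnessOut_funct.2 ∧ pvDiffWitnessOut_funct.1 ≠ pvDiffWitnessOut_funct.2
def Claim_exact_funct : Prop := ∀ (num : List Int) (asc : Int), Dom_funct num asc → D_funct num asc → funct num asc ≠ funct_alt num asc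

-- ===== LEMMAS AND PROOFS =====
-- validB is the proof-side name for "all adjacent pairs are in range"
def validB (asc : Int) (l : List Int) : Bool :=
  (l.zip l.tail).all (fun p => okB asc p.1 p.2)

theorem step_eq (asc a : Int) (y : Int × Int) :
    (if asc > 0 then (if ¬ (1 ≤ y.2 - y.1 ∧ y.2 - y.1 ≤ 3) then (0:Int) else a)
     else (if ¬ (1 ≤ y.1 - y.2 ∧ y.1 - y.2 ≤ 3) then 0 else a))
    = if okB asc y.1 y.2 then a else 0 := by
  by_cases h : asc > 0
  · have hk : okB asc y.1 y.2 = decide (1 ≤ y.2 - y.1 ∧ y.2 - y.1 ≤ 3) := by simp [okB, h]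
    rw [if_pos h, hk]
    by_cases hc : (1 ≤ y.2 - y.1 ∧ y.2 - y.1 ≤ 3)
    · rw [if_neg (not_not_intro hc), if_pos (by simpa using hc)]
    · rw [if_pos hc, if_neg (by simpa using hc)]
  · have hk : okB asc y.1 y.2 = decide (1 ≤ y.1 - y.2 ∧ y.1 - y.2 ≤ 3) := by simp [okB, h]
    rw [if_neg h, hk]
    by_cases hc : (1 ≤ y.1 - y.2 ∧ y.1 - y.2 ≤ 3)
    · rw [if_neg (not_not_intro hc), if_pos (by simpa using hc)]
    · rw [if_pos hc, if_neg (by simpa using hc)]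

theorem foldl_keep (p : Int × Int → Bool) :
    ∀ (ys : List (Int × Int)) (a : Int),
      ys.foldl (fun acc y => if p y then acc else 0) a = if ys.all p then a else 0 := by
  intro ys
  induction ys with
  | nil => simp
  | cons y ys ih =>
    intro a
    rw [List.foldl_cons, List.all_cons]
    by_cases h : p y
    · simp only [h, if_true, Bool.true_and]; exact ih a
    · simp [h, ih]

theorem scan_eq (asc : Int) (l : List Int) :
    functScan asc l = if validB asc l then 1 else 0 := by
  unfold functScan validB
  rw [PySem.List.slice_from_one]
  simp only [step_eq]
  exact foldl_keep _ _ 1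

theorem allOkB_eq (asc : Int) (l : List Int) : allOkB asc l = validB asc l := by
  unfold allOkB validB
  rw [PySem.List.slice_from_one]

theorem validB_iff (asc : Int) (l : List Int) :
    validB asc l = true ↔ ∀ m (_ : m + 1 < l.length), okB asc l[m] l[m+1] := by
  unfold validB
  rw [List.all_eq_true]
  constructor
  · intro h m hm
    have hz : m < (l.zip l.tail).length := by simp [List.length_zip]; omega
    have := h (l.zip l.tail)[m] (List.getElem_mem hz)
    rw [List.getElem_zip] at this
    rwa [List.getElem_tail] at this
  · intro h p hp
    obtain ⟨i, hi, rfl⟩ := List.mem_iff_getElem.mp hp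
    have hi' : i + 1 < l.length := by simp [List.length_zip] at hi; omega
    rw [List.getElem_zip]
    have := h i hi'
    simpa [List.getElem_tail] using this

theorem loop_char (num : List Int) (asc : Int) (h : validB asc num = false) :
    ∀ (rest : List Int) (i : Nat),
      functLoop num asc i rest =
        if (List.range rest.length).any (fun k => validB asc (num.eraseIdx (i + k))) then 1 else 0 := by
  intro rest
  induction rest with
  | nil => intro i; simp [functLoop]
  | cons x rest ih =>
    intro i
    have harg : ∀ k : Nat, i + 1 + k = i + (k + 1) := by omega
    have hbody :
        (if functScan asc (num.eraseIdx i) ≠ 0 then functScan asc (num.eraseIdx i)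
         else functLoop num asc (i + 1) rest) =
        if (List.range (x :: rest).length).any (fun k => validB asc (num.eraseIdx (i + k))) then 1 else 0 := by
      rw [scan_eq, ih (i + 1), List.length_cons, List.range_succ_eq_map]
      simp only [List.any_cons, List.any_map, Function.comp_def, harg, Nat.add_zero]
      by_cases hv : validB asc (num.eraseIdx i) <;> simp [hv]
    by_cases hi : i = 0
    · subst hi
      have hs : functScan asc num = 0 := by rw [scan_eq, h]; simp
      simp only [functLoop, hs]
      rw [if_neg (by simp : ¬(0:Int) ≠ 0)]
      exact hbody
    · simp only [functLoop, if_neg hi]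
      exact hbody

theorem mem_enumerate_struct {α : Type} (xs : List α) :
    ∀ (s : Int) (p : Int × α), p ∈ PySem.List.enumerate xs s →
      ∃ k : Nat, ∃ hk : k < xs.length, p.1 = s + k ∧ p.2 = xs[k] := by
  induction xs with
  | nil => intro s p hp; simp [PySem.List.enumerate_nil] at hp
  | cons x xs ih =>
    intro s p hp
    rw [PySem.List.enumerate_cons] at hp
    rcases List.mem_cons.mp hp with h | h
    · exact ⟨0, by simp, by simp [h]⟩
    · obtain ⟨k, hk, h1, h2⟩ := ih (s + 1) p h
      exact ⟨k + 1, by simpa using hk, by rw [h1]; push_cast; ring, by simpa using h2⟩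

theorem erase_invalid (asc : Int) (num : List Int) (k i : Nat)
    (hk : k + 1 < num.length) (hbad : okB asc num[k] num[k+1] = false)
    (hi : i < num.length) (h1 : i ≠ k) (h2 : i ≠ k + 1) :
    validB asc (num.eraseIdx i) = false := by
  by_contra hcon
  rw [Bool.not_eq_false, validB_iff] at hcon
  have hlen : (num.eraseIdx i).length = num.length - 1 := List.length_eraseIdx_of_lt hi
  rcases Nat.lt_or_ge i k with hik | hik
  · -- i < k : the bad pair sits at positions k-1, k of the erased list
    have hm : (k - 1) + 1 < (num.eraseIdx i).length := by omega
    have := hcon (k - 1) hm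
    have e1 : (num.eraseIdx i)[k-1]'(by omega) = num[k] := by
      rw [List.getElem_eraseIdx]
      rw [dif_neg (by omega)]
      congr 1
      omega
    have e2 : (num.eraseIdx i)[(k-1)+1]'(by omega) = num[k+1] := by
      rw [List.getElem_eraseIdx]
      rw [dif_neg (by omega)]
      congr 1
      omega
    rw [e1, e2] at this
    rw [hbad] at this
    exact Bool.false_ne_true this
  · -- k + 1 < i : the bad pair sits at positions k, k+1 of the erased list
    have hik' : k + 1 < i := by omega
    have hm : k + 1 < (num.eraseIdx i).length := by omega
    have := hcon k hm
    have e1 : (num.eraseIdx i)[k]'(by omega) = num[k] := by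
      rw [List.getElem_eraseIdx, dif_pos (by omega)]
    have e2 : (num.eraseIdx i)[k+1]'(by omega) = num[k+1] := by
      rw [List.getElem_eraseIdx, dif_pos (by omega)]
    rw [e1, e2] at this
    rw [hbad] at this
    exact Bool.false_ne_true this

theorem functRem_eq (num : List Int) (k : Nat) :
    functRem num (k : Int) = num.eraseIdx k := by
  unfold functRem
  have h1 : PySem.List.slice num none (some (k : Int)) = num.take k := PySem.List.slice_to_natCast num k
  have h2 : PySem.List.slice num (some ((k : Int) + 1)) none = num.drop (k + 1) := by
    have : ((k : Int) + 1) = ((k + 1 : Nat) : Int) := by push_cast; ring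
    rw [this, PySem.List.slice_from_natCast]
  rw [h1, h2, List.eraseIdx_eq_take_drop_succ]

theorem main_eq (num : List Int) (asc : Int) (hne : num ≠ []) : funct num asc = funct_alt num asc := by
  have halt : funct_alt num asc =
      (match (PySem.List.enumerate (num.zip num.tail)).find? (fun p => ! okB asc p.2.1 p.2.2) with
       | none => 1
       | some (j, _) =>
         if allOkB asc (functRem num j) then 1
         else if allOkB asc (functRem num (j + 1)) then 1
         else 0) := by
    unfold funct_alt
    rw [PySem.List.slice_from_one]
  by_cases hv : validB asc num = true
  · have hnone : (PySem.List.enumerate (num.zip num.tail)).find? (fun p => ! okB asc p.2.1 p.2.2) = none := by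
      rw [List.find?_eq_none]
      intro p hp
      have hsnd : p.2 ∈ num.zip num.tail := by
        have := List.mem_map_of_mem (f := Prod.snd) hp
        rwa [PySem.List.map_snd_enumerate] at this
      have hok := List.all_eq_true.mp hv p.2 hsnd
      simp [hok]
    rw [halt, hnone]
    obtain ⟨x, rest, rfl⟩ := List.exists_cons_of_ne_nil hne
    simp [funct, functLoop, scan_eq, hv]
  · have hv' : validB asc num = false := by rwa [Bool.not_eq_true] at hv
    have hA : funct num asc =
        if (List.range num.length).any (fun k => validB asc (num.eraseIdx k)) then 1 else 0 := by
      unfold funct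
      rw [loop_char num asc hv' num 0]
      simp
    cases hfind : (PySem.List.enumerate (num.zip num.tail)).find? (fun p => ! okB asc p.2.1 p.2.2) with
    | none =>
      exfalso
      have hall := List.find?_eq_none.mp hfind
      unfold validB at hv'
      obtain ⟨q, hq, hnok⟩ := List.all_eq_false.mp hv'
      have hq' : q ∈ (PySem.List.enumerate (num.zip num.tail)).map Prod.snd := by
        rw [PySem.List.map_snd_enumerate]; exact hq
      obtain ⟨p, hpmem, hpq⟩ := List.mem_map.mp hq'
      apply hall p hpmem
      rw [hpq]
      simp only [Bool.not_eq_true] at hnok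
      simp [hnok]
    | some jp =>
      obtain ⟨j, pr⟩ := jp
      have hpred := List.find?_some hfind
      have hmem := List.mem_of_find?_eq_some hfind
      obtain ⟨k, hk, h1, h2⟩ := mem_enumerate_struct _ 0 _ hmem
      have hk1 : k + 1 < num.length := by
        simp [List.length_zip, List.length_tail] at hk
        omega
    
      have hzk : (num.zip num.tail)[k]'hk = ((num[k]'(by omega) : Int), (num[k+1]'hk1 : Int)) := by
        rw [List.getElem_zip]
        congr 1
        exact List.getElem_tail _
      have hbad : okB asc (num[k]'(by omega)) (num[k+1]'hk1) = false := by
        have hpr : pr = ((num[k]'(by omega) : Int), (num[k+1]'hk1 : Int)) := by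
          simp only at h2; rw [h2, hzk]
        rw [hpr] at hpred
        simpa using hpred
      have hj : j = (k : Int) := by simpa using h1
      have hrem2 : functRem num ((k:Int)+1) = num.eraseIdx (k+1) := by
        have hc : ((k:Int)+1) = ((k+1:Nat):Int) := by push_cast; ring
        rw [hc]; exact functRem_eq num (k+1)
      rw [hA, halt, hfind, hj]
      simp only [allOkB_eq, functRem_eq, hrem2]
      by_cases e1 : validB asc (num.eraseIdx k) = true
      · rw [if_pos e1, if_pos (List.any_eq_true.mpr ⟨k, List.mem_range.mpr (by omega), e1⟩)]
      · by_cases e2 : validB asc (num.eraseIdx (k+1)) = true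
        · rw [if_neg e1, if_pos e2, if_pos (List.any_eq_true.mpr ⟨k+1, List.mem_range.mpr (by omega), e2⟩)]
        · rw [if_neg e1, if_neg e2, if_neg]
          intro hany
          obtain ⟨m, hm, hvm⟩ := List.any_eq_true.mp hany
          have hmlen := List.mem_range.mp hm
          by_cases hmk : m = k
          · exact e1 (hmk ▸ hvm)
          · by_cases hmk1 : m = k + 1
            · exact e2 (hmk1 ▸ hvm)
            · have hz := erase_invalid asc num k m hk1 hbad hmlen hmk hmk1
              rw [hz] at hvm
              exact Bool.false_ne_true hvm

-- ===== VERDICT (by name: the statement is the Claim_ definition above) =====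
theorem funct_spec : Claim_unchanged_funct := by
  intro num asc _ hD
  exact main_eq num asc hD

theorem funct_changed : Claim_changed_funct := by unfold Claim_changed_funct; decide

theorem funct_tight : Claim_exact_funct := by
  intro num asc _ hD
  unfold D_funct at hD
  subst hD
  simp [funct, functLoop, funct_alt, PySem.List.enumerate_nil]
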